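-- pv_equiv track=rewrite | github.com/Str-Ben/StructureBench | eval/chequessample_eval.py | _index_predictions
-- ===== SOURCE A (Python) =====
-- from typing import Any, Dict, Iterable, Mapping, Optional, Tuple
--
-- def _get_field(item: Any, key: str, default=None):
--     if isinstance(item, Mapping):
--         return item.get(key, default)
--     return getattr(item, key, default)
--
-- def _index_predictions(records: Iterable[Dict[str, Any]]) -> Tuple[Dict[str, Dict[str, Any]], int]:
--     pred_map: Dict[str, Dict[str, Any]] = {}
--     duplicates = 0
--     for idx, record in enumerate(records):
--         sample_id = _get_field(record, "sample_id", None)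
--         if sample_id is None:
--             sample_id = f"idx-{idx}"
--         sample_id = str(sample_id)
--         if sample_id in pred_map:
--             duplicates += 1
--             continue
--         pred_map[sample_id] = record
--     return pred_map, duplicates
-- ===== SOURCE B (Python) =====
-- from typing import Any, Dict, Iterable, Tuple
--
-- def _index_predictions(records: Iterable[Dict[str, Any]]) -> Tuple[Dict[str, Dict[str, Any]], int]:
--     recs = list(records)
--     ids = []
--     for idx, record in enumerate(recs):
--         sid = record.get("sample_id")
--         ids.append(f"idx-{idx}" if sid is None else str(sid))
--     # Last assignment wins when a dict is built from pairs, so feeding the pairs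
--     # in reverse makes the EARLIEST record per id the surviving value.
--     by_id = dict(zip(reversed(ids), reversed(recs)))
--     # dict.fromkeys keeps the ids' first-occurrence order.
--     pred_map = {sid: by_id[sid] for sid in dict.fromkeys(ids)}
--     return pred_map, len(recs) - len(pred_map)
-- ===== Notes on version B (the rewrite author's own statement) =====
-- stated objective: alternative
-- what changed: B replaces A's stateful first-wins loop (membership test + duplicate counter) by staged dict-algebra passes: compute the id list, build a reversed-pairs dict so the earliest record per id survives by overwrite, reindex it in dict.fromkeys first-occurrence order, and derive duplicates as len(recs) - len(pred_map).
import Mathlib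
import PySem

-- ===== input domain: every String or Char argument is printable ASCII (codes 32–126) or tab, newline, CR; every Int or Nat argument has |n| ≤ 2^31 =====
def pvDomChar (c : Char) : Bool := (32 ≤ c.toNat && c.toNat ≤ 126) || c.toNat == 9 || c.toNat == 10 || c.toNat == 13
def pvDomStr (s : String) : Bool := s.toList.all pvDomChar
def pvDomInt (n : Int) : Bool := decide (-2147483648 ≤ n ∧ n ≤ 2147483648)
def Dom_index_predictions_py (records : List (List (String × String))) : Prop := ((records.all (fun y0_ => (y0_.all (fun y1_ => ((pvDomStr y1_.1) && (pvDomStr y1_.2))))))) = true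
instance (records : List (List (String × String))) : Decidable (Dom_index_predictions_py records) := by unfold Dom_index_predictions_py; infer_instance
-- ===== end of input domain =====

-- B is an alternative decomposition: staged passes over an id list, a reversed-pairs dict whose
-- overwrite semantics keeps the earliest record per id, reindexed in first-occurrence order, with
-- duplicates derived as a length difference — instead of A's stateful membership-branch loop.

-- ===== PORT A =====
-- _get_field(record, "sample_id", None) for a dict record, followed by the `is None` fallback
-- f"idx-{idx}" and str(); record values are strings so str() is the identity.
def pvSampleId (idx : Int) (record : List (String × String)) : String :=
  match (PySem.Dict.mk record).get? "sample_id" with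
  | some s => s
  | none => "idx-" ++ PySem.Int.toStr idx

def index_predictions_py (records : List (List (String × String))) : (List (String × List (String × String))) × Int :=
  let st := (PySem.List.enumerate records 0).foldl
    (fun (st : PySem.Dict String (List (String × String)) × Int) p =>
      let sid := pvSampleId p.1 p.2
      if st.1.contains sid then (st.1, st.2 + 1) else (st.1.insert sid p.2, st.2))
    (PySem.Dict.empty, 0)
  (st.1.items, st.2)

-- ===== PORT B =====
def index_predictions_py_alt (records : List (List (String × String))) : (List (String × List (String × String))) × Int :=
  let ids := (PySem.List.enumerate records 0).foldl
    (fun (acc : List String) p => acc ++ [pvSampleId p.1 p.2]) []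
  -- by_id = dict(zip(reversed(ids), reversed(recs)))
  let byId := PySem.Dict.ofList (ids.reverse.zip records.reverse)
  -- pred_map = {sid: by_id[sid] for sid in dict.fromkeys(ids)}; by_id[sid] never raises
  -- (every sid is a key of by_id), so the lookup is ported with getD.
  let pm := PySem.Dict.ofList ((PySem.List.dedup ids).map (fun s => (s, byId.getD s [])))
  (pm.items, (records.length : Int) - pm.size)

-- ===== PRECONDITION & SPEC =====
def Spec_index_predictions_py (records : List (List (String × String))) (out : (List (String × List (String × String))) × Int) : Prop := out = index_predictions_py_alt records
instance (records : List (List (String × String))) (out : (List (String × List (String × String))) × Int) : Decidable (Spec_index_predictions_py records out) := by unfold Spec_index_predictions_py; infer_instance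

-- ===== CLAIM (what is proved, stated in full; the proofs are below) =====
def Claim_equal_index_predictions_py : Prop := ∀ (records : List (List (String × String))), Dom_index_predictions_py records → Spec_index_predictions_py records (index_predictions_py records)

-- ===== LEMMAS AND PROOFS =====

-- A's loop body, over the precomputed (sample_id, record) pairs.
def pvStepA (st : PySem.Dict String (List (String × String)) × Int)
    (q : String × List (String × String)) :
    PySem.Dict String (List (String × String)) × Int :=
  if st.1.contains q.1 then (st.1, st.2 + 1) else (st.1.insert q.1 q.2, st.2)

-- A's dict answers lookups by the FIRST pair with that key (unless already present in d).
theorem pv_foldA_get? (ps : List (String × List (String × String)))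
    (d : PySem.Dict String (List (String × String))) (c : Int) (k : String) :
    ((ps.foldl pvStepA (d, c)).1).get? k
      = (d.get? k).or ((ps.find? (fun q => q.1 == k)).map (·.2)) := by
  induction ps generalizing d c with
  | nil => simp
  | cons q t ih =>
    simp only [List.foldl_cons, List.find?_cons, pvStepA]
    by_cases h : d.contains q.1 = true
    · rw [if_pos h, ih]
      by_cases hk : q.1 == k
      · have hk' : q.1 = k := by simpa using hk
        subst hk'
        have : (d.get? q.1).isSome := by rw [← PySem.Dict.contains_eq_isSome_get?]; exact h
        obtain ⟨v, hv⟩ := Option.isSome_iff_exists.mp this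
        simp [hv]
      · simp [hk]
    · rw [if_neg h, ih]
      by_cases hk : q.1 == k
      · have hk' : q.1 = k := by simpa using hk
        subst hk'
        have hd : d.get? q.1 = none := by
          cases hD : d.get? q.1 with
          | none => rfl
          | some v =>
            have := PySem.Dict.contains_eq_isSome_get? d q.1
            rw [hD] at this
            simp [this] at h
        simp [hd]
      · have hne : k ≠ q.1 := fun he => by simp [he] at hk
        simp [hk, PySem.Dict.get?_insert, hne]

theorem pv_foldA_keys (ps : List (String × List (String × String)))
    (d : PySem.Dict String (List (String × String))) (c : Int) :
    ((ps.foldl pvStepA (d, c)).1).keys = PySem.Set.update d.keys (ps.map (·.1)) := by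
  induction ps generalizing d c with
  | nil => simp [PySem.Set.update]
  | cons q t ih =>
    simp only [List.foldl_cons, List.map_cons, PySem.Set.update_cons, pvStepA]
    by_cases h : d.contains q.1 = true
    · have hmem : q.1 ∈ d.keys := (PySem.Dict.contains_iff_mem_keys d q.1).mp h
      have hadd : PySem.Set.add d.keys q.1 = d.keys := by simp [PySem.Set.add, hmem]
      rw [if_pos h, ih, hadd]
    · have hfc : d.contains q.1 = false := by simpa using h
      have hmem : q.1 ∉ d.keys := fun hm =>
        by simp [(PySem.Dict.contains_iff_mem_keys d q.1).mpr hm] at hfc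
      have hadd : PySem.Set.add d.keys q.1 = d.keys ++ [q.1] := by
        simp [PySem.Set.add, hmem]
      rw [if_neg h, ih, PySem.Dict.keys_insert_of_not_contains d q.2 hfc, hadd]

-- duplicates + size of the dict = initial values + number of pairs processed
theorem pv_foldA_count (ps : List (String × List (String × String)))
    (d : PySem.Dict String (List (String × String))) (c : Int) :
    (ps.foldl pvStepA (d, c)).2 + (((ps.foldl pvStepA (d, c)).1).size : Int)
      = c + (d.size : Int) + ps.length := by
  induction ps generalizing d c with
  | nil => simp
  | cons q t ih =>
    simp only [List.foldl_cons, pvStepA]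
    by_cases h : d.contains q.1 = true
    · rw [if_pos h, ih]; push_cast [List.length_cons]; ring
    · rw [if_neg h, ih, PySem.Dict.size_insert]
      simp only [h, Bool.false_eq_true, if_false, List.length_cons]
      push_cast; ring

-- B's insert loop (dict built from a pair list) answers lookups by the LAST pair with that key.
theorem pv_foldB_get? (l : List (String × List (String × String)))
    (d : PySem.Dict String (List (String × String))) (k : String) :
    (l.foldl (fun acc p => acc.insert p.1 p.2) d).get? k
      = ((l.reverse.find? (fun q => q.1 == k)).map (·.2)).or (d.get? k) := by
  induction l generalizing d with
  | nil => simp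
  | cons q t ih =>
    simp only [List.foldl_cons, List.reverse_cons, ih, List.find?_append]
    by_cases hk : q.1 == k
    · have hk' : q.1 = k := by simpa using hk
      subst hk'
      simp
    · have hne : k ≠ q.1 := fun he => by simp [he] at hk
      simp [PySem.Dict.get?_insert, hk, hne]

-- ===== VERDICT (by name: the statement is the Claim_ definition above) =====
theorem index_predictions_py_spec : Claim_equal_index_predictions_py := by
  intro records _
  unfold Spec_index_predictions_py index_predictions_py index_predictions_py_alt
  simp only []
  set en := PySem.List.enumerate records 0 with hen
  set f : Int × List (String × String) → String := fun p => pvSampleId p.1 p.2 with hf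
  set ps : List (String × List (String × String)) := en.map (fun p => (f p, p.2)) with hps
  -- B's ids list is the map of f over the enumeration
  have hids : en.foldl (fun (acc : List String) p => acc ++ [pvSampleId p.1 p.2]) []
      = ps.map (·.1) := by
    rw [PySem.List.foldl_append_singleton_eq_map f en []]
    simp [hps, List.map_map, Function.comp]
  -- A's fold is the fold of pvStepA over ps
  have hA : en.foldl
      (fun (st : PySem.Dict String (List (String × String)) × Int) p =>
        let sid := pvSampleId p.1 p.2
        if st.1.contains sid then (st.1, st.2 + 1) else (st.1.insert sid p.2, st.2))
      (PySem.Dict.empty, 0)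
      = ps.foldl pvStepA (PySem.Dict.empty, 0) := by
    rw [hps, List.foldl_map]
    rfl
  -- the zipped reversed pair list is ps.reverse
  have hzip : ((ps.map (·.1)).reverse).zip records.reverse = ps.reverse := by
    have hrec : records = en.map (·.2) := (PySem.List.map_snd_enumerate records 0).symm
    have h1 : (ps.map (·.1)) = en.map f := by
      simp [hps, List.map_map, Function.comp]
    calc ((ps.map (·.1)).reverse).zip records.reverse
        = (en.reverse.map f).zip (en.reverse.map (·.2)) := by
          rw [h1, hrec]; simp [List.map_reverse]
      _ = en.reverse.map (fun p => (f p, p.2)) := List.zip_map'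
      _ = ps.reverse := by simp [hps, List.map_reverse]
  rw [hids, hA, hzip]
  -- characterize A's dict
  set dA := (ps.foldl pvStepA (PySem.Dict.empty, 0)).1 with hdA
  have hkeysA : dA.keys = PySem.Set.ofList (ps.map (·.1)) := by
    rw [hdA, pv_foldA_keys]
    simpa using PySem.Set.update_empty (ps.map (·.1))
  have hnodupA : dA.keys.Nodup := by rw [hkeysA]; exact PySem.Set.nodup_ofList _
  have hgetA : ∀ k, dA.get? k = (ps.find? (fun q => q.1 == k)).map (·.2) := by
    intro k
    rw [hdA, pv_foldA_get?]
    simp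
  -- characterize by_id
  have hbyId : ∀ k, (PySem.Dict.ofList ps.reverse).get? k
      = (ps.find? (fun q => q.1 == k)).map (·.2) := by
    intro k
    show ((ps.reverse).foldl (fun acc p => acc.insert p.1 p.2) PySem.Dict.empty).get? k = _
    rw [pv_foldB_get?]
    simp
  -- the common items list
  set l' := (PySem.List.dedup (ps.map (·.1))).map
      (fun s => (s, (PySem.Dict.ofList ps.reverse).getD s [])) with hl'
  have hl'eq : l' = (PySem.Set.ofList (ps.map (·.1))).map
      (fun s => (s, ((ps.find? (fun q => q.1 == s)).map (·.2)).getD [])) := by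
    rw [hl', PySem.List.dedup_eq_ofList]
    apply List.map_congr_left
    intro s _
    rw [PySem.Dict.getD_eq_get?_getD, hbyId]
  -- pm's items are exactly l'
  have hfresh : ∀ a ∈ l', (PySem.Dict.empty : PySem.Dict String (List (String × String))).contains a.1 = false := by
    intro a _; simp
  have hnodupl' : (l'.map (·.1)).Nodup := by
    have hml : l'.map (·.1) = PySem.Set.ofList (ps.map (·.1)) := by
      rw [hl', PySem.List.dedup_eq_ofList, List.map_map]
      exact List.map_id _
    rw [hml]
    exact PySem.Set.nodup_ofList _
  have hpm : (PySem.Dict.ofList l').items = l' := by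
    show ((l'.foldl (fun acc p => acc.insert p.1 p.2) PySem.Dict.empty)).items = l'
    have := PySem.Dict.items_foldl_insert_fresh l' (·.1) (·.2) PySem.Dict.empty hfresh hnodupl'
    simpa using this
  -- A's items are the same list
  have hitemsA : dA.items = l' := by
    rw [PySem.Dict.items_eq_map_keys dA hnodupA [], hkeysA, hl'eq]
    apply List.map_congr_left
    intro s _
    rw [PySem.Dict.getD_eq_get?_getD, hgetA]
  -- sizes and the duplicate count
  have h1 : (PySem.Dict.ofList l').size = l'.length := by
    show (PySem.Dict.ofList l').items.length = l'.length
    rw [hpm]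
  have h2 : dA.size = l'.length := by
    show dA.items.length = l'.length
    rw [hitemsA]
  have hlen : (records.length : Int) = (ps.length : Int) := by
    simp [hps, hen, PySem.List.length_enumerate]
  have hcount := pv_foldA_count ps PySem.Dict.empty 0
  rw [← hdA] at hcount
  simp only [PySem.Dict.size_empty] at hcount
  refine Prod.ext ?_ ?_
  · exact hitemsA.trans hpm.symm
  · simp only []
    rw [hlen]
    omega
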